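-- pv_equiv track=rewrite | github.com/zywh/waterlooccc | 2022/j5.py | can_place_square
-- ===== SOURCE A (Python) =====
-- def can_place_square(N, trees, size):
--     """Check if a square of given size can be placed without hitting trees"""
--     tree_set = set(trees)  # Convert to set for O(1) lookup
--
--     # Try all possible top-left corners for the square
--     for top_row in range(1, N - size + 2):  # 1-indexed, ensure square fits
--         for left_col in range(1, N - size + 2):
--             # Check if this square position contains any trees
--             has_tree = False
--             for r in range(top_row, top_row + size):
--                 for c in range(left_col, left_col + size):
--                     if (r, c) in tree_set:
--                         has_tree = True
--                         break
--                 if has_tree: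
--                     break
--
--             if not has_tree:
--                 return True
--
--     return False
-- ===== SOURCE B (Python) =====
-- def can_place_square(N, trees, size):
--     """Check if a square of given size can be placed without hitting trees.
--     Scans the tree LIST per candidate square instead of every cell of the square."""
--     for top in range(1, N - size + 2):
--         for left in range(1, N - size + 2):
--             if not any(top <= r < top + size and left <= c < left + size
--                        for (r, c) in trees):
--                 return True
--     return False
-- ===== Notes on version B (the rewrite author's own statement) =====
-- stated objective: alternative
-- what changed: B checks each candidate square against the tree list directly (is any tree inside the box?) instead of scanning every cell of the square against a set of trees, removing the size*size inner double loop.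
import Mathlib
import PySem

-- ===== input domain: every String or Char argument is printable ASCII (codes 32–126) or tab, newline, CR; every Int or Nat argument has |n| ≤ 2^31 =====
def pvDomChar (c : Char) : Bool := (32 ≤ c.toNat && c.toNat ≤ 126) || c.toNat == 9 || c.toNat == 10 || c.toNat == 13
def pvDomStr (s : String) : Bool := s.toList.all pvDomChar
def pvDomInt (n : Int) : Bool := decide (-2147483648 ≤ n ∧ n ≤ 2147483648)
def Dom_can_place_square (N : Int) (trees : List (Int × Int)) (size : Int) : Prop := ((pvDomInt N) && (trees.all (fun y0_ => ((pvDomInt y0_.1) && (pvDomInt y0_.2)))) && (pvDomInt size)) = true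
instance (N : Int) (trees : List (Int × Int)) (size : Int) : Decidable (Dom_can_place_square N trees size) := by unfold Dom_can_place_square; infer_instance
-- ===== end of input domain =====

-- B checks each candidate square against the tree list (is any tree inside the box?) instead of
-- scanning every cell of the square against a set of trees; same result on every input.

-- shared loop helper: 'for i in range(a, b): if f(i): <break with True>' — lazy, short-circuiting
-- (a materialized pyRange list would not evaluate on huge empty-result ranges Python exits at once)
def anyRangeGo (f : Int → Bool) : Int → Nat → Bool
  | _, 0 => false
  | a, n + 1 => f a || anyRangeGo f (a + 1) n

def anyRange (a b : Int) (f : Int → Bool) : Bool := anyRangeGo f a (b - a).toNat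

-- ===== PORT A =====
def can_place_square (N : Int) (trees : List (Int × Int)) (size : Int) : Bool :=
  let tree_set : PySem.Set (Int × Int) := PySem.Set.ofList trees
  anyRange 1 (N - size + 2) (fun top_row =>
    anyRange 1 (N - size + 2) (fun left_col =>
      let has_tree := anyRange top_row (top_row + size) (fun r =>
        anyRange left_col (left_col + size) (fun c =>
          PySem.Set.contains tree_set (r, c)))
      !has_tree))

-- ===== PORT B =====
def can_place_square_alt (N : Int) (trees : List (Int × Int)) (size : Int) : Bool :=
  anyRange 1 (N - size + 2) (fun top =>
    anyRange 1 (N - size + 2) (fun left =>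
      ! trees.any (fun t =>
          decide (top ≤ t.1 ∧ t.1 < top + size ∧ left ≤ t.2 ∧ t.2 < left + size))))

-- ===== PRECONDITION & SPEC =====
def Spec_can_place_square (N : Int) (trees : List (Int × Int)) (size : Int) (out : Bool) : Prop := out = can_place_square_alt N trees size
instance (N : Int) (trees : List (Int × Int)) (size : Int) (out : Bool) : Decidable (Spec_can_place_square N trees size out) := by unfold Spec_can_place_square; infer_instance

-- ===== CLAIM (what is proved, stated in full; the proofs are below) =====
def Claim_equal_can_place_square : Prop := ∀ (N : Int) (trees : List (Int × Int)) (size : Int), Dom_can_place_square N trees size → Spec_can_place_square N trees size (can_place_square N trees size)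

-- ===== LEMMAS AND PROOFS =====

lemma anyRange_eq_any_pyRange (a b : Int) (f : Int → Bool) :
    anyRange a b f = (PySem.List.pyRange a b 1).any f := by
  unfold anyRange
  rw [PySem.List.pyRange_one]
  generalize (b - a).toNat = n
  induction n generalizing a with
  | zero => simp [anyRangeGo]
  | succ n ih =>
    simp only [anyRangeGo, List.range_succ_eq_map, List.map_cons, List.any_cons,
      List.map_map, ih]
    congr 1
    · simp
    · congr 1
      apply List.map_congr_left
      intro k _
      simp [Function.comp]
      omega

-- The square at (top,left) is tree-free: A's cell-by-cell scan equals B's scan of the tree list.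
lemma inner_eq (trees : List (Int × Int)) (size top left : Int) :
    ((PySem.List.pyRange top (top + size) 1).any (fun r =>
        (PySem.List.pyRange left (left + size) 1).any (fun c =>
          PySem.Set.contains (PySem.Set.ofList trees) (r, c))))
      = trees.any (fun t =>
          decide (top ≤ t.1 ∧ t.1 < top + size ∧ left ≤ t.2 ∧ t.2 < left + size)) := by
  apply Bool.eq_iff_iff.mpr
  simp only [List.any_eq_true, PySem.List.mem_pyRange_one, decide_eq_true_eq,
    PySem.Set.contains_iff, PySem.Set.mem_ofList]
  constructor
  · rintro ⟨r, ⟨hr1, hr2⟩, c, ⟨hc1, hc2⟩, hm⟩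
    exact ⟨(r, c), hm, hr1, hr2, hc1, hc2⟩
  · rintro ⟨⟨r, c⟩, hm, h1, h2, h3, h4⟩
    exact ⟨r, ⟨h1, h2⟩, c, ⟨h3, h4⟩, hm⟩

-- ===== VERDICT (by name: the statement is the Claim_ definition above) =====
theorem can_place_square_spec : Claim_equal_can_place_square := by
  intro N trees size _
  unfold Spec_can_place_square can_place_square can_place_square_alt
  simp only [anyRange_eq_any_pyRange, inner_eq]
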